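-- pv_equiv track=rewrite | github.com/Anred2004/Asd | lab_11/main.py | create_automaton
-- ===== SOURCE A (Python) =====
-- def create_automaton(pattern):
--     # Алфавит символов в строке поиска
--     alphabet = list(set(pattern))
--     # Длина строки поиска
--     m = len(pattern)
--     # Количество состояний автомата
--     n = m + 1
--     # Словарь для хранения переходов автомата
--     transitions = {}
--     # Цикл по всем состояниям
--     for i in range(n):
--         # Цикл по всем символам алфавита
--         for a in alphabet:
--             # Вычисление следующего состояния с помощью функции next
--             k = next((j for j in range(min(m, i + 1), 0, -1) if pattern[j - 1] == a), 0)
--             # Добавление перехода в словарь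
--             transitions[(i, a)] = k
--         # Добавление перехода для любого другого символа в нулевое состояние
--         transitions[(i, None)] = 0
--     # Возвращение конечного автомата
--     return transitions
-- ===== SOURCE B (Python) =====
-- def create_automaton(pattern):
--     # One pass over the states: maintain, for each alphabet symbol, the 1-based
--     # position of its last occurrence in pattern[:min(m, i+1)] and emit it in O(1),
--     # instead of rescanning the prefix for every (state, symbol) pair.
--     alphabet = list(set(pattern))
--     m = len(pattern)
--     last = {a: 0 for a in alphabet}
--     transitions = {}
--     for i in range(m + 1):
--         b = min(m, i + 1)
--         if b >= 1:
--             last[pattern[b - 1]] = b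
--         for a in alphabet:
--             transitions[(i, a)] = last[a]
--         transitions[(i, None)] = 0
--     return transitions
-- ===== Notes on version B (the rewrite author's own statement) =====
-- stated objective: faster
-- what changed: B replaces A's per-(state,symbol) backward rescan of the pattern prefix with one incrementally maintained last-occurrence dictionary updated in O(1) as the prefix bound grows.
import Mathlib
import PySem

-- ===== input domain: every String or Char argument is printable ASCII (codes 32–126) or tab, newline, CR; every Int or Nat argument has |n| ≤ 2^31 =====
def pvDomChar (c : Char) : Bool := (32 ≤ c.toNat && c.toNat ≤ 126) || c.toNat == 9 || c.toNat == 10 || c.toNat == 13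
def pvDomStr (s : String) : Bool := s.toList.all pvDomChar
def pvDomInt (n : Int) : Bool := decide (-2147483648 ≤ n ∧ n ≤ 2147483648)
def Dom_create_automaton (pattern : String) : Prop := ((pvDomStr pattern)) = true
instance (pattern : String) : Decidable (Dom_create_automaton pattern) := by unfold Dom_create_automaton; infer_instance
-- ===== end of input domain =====

-- B replaces A's per-(state,symbol) backward rescan with one incrementally maintained
-- last-occurrence dictionary, updated in O(1) as the prefix bound grows (asymptotically faster).


-- ===== PORT A =====
-- A's transition dict only ever inserts FRESH keys (i, a), so each dict insertion is ported
-- as a list append.  list(set(pattern)) is ported as PySem.Set.ofList (first-occurrence order;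
-- Python's hash iteration order is not modelled — the dict output is compared ignoring order).
def create_automaton (pattern : String) : List (Int × Option String × Int) :=
  let cs := pattern.toList
  let alphabet : PySem.Set Char := PySem.Set.ofList cs
  let m : Int := PySem.List.len cs
  let n : Int := m + 1
  (PySem.List.pyRange 0 n 1).foldl (fun trans i =>
    (alphabet.foldl (fun trans a =>
        trans ++ [(i, some (String.singleton a),
          ((PySem.List.pyRange (min m (i + 1)) 0 (-1)).find?
            (fun j => PySem.List.pyGet? cs (j - 1) == some a)).getD 0)]) trans)
      ++ [(i, none, 0)]) []

-- ===== PORT B =====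
-- transliteration of Source B; last[pattern[b-1]] = b indexes in range whenever 1 ≤ b
-- (the `none` match arm is unreachable), and last[a] is a lookup of an initialised key.
def create_automaton_alt (pattern : String) : List (Int × Option String × Int) :=
  let cs := pattern.toList
  let alphabet : PySem.Set Char := PySem.Set.ofList cs
  let m : Int := PySem.List.len cs
  let last0 : PySem.Dict Char Int := alphabet.foldl (fun d a => d.insert a 0) PySem.Dict.empty
  let st := (PySem.List.pyRange 0 (m + 1) 1).foldl
    (fun (st : PySem.Dict Char Int × List (Int × Option String × Int)) i =>
      let b : Int := min m (i + 1)
      let last := if 1 ≤ b then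
          (match PySem.List.pyGet? cs (b - 1) with
           | some c => st.1.insert c b
           | none => st.1)
        else st.1
      let trans := (alphabet.foldl (fun trans a =>
          trans ++ [(i, some (String.singleton a), last.getD a 0)]) st.2)
        ++ [(i, none, 0)]
      (last, trans)) (last0, [])
  st.2

-- ===== PRECONDITION & SPEC =====
def Spec_create_automaton (pattern : String) (out : List (Int × Option String × Int)) : Prop := out = create_automaton_alt pattern
instance (pattern : String) (out : List (Int × Option String × Int)) : Decidable (Spec_create_automaton pattern out) := by unfold Spec_create_automaton; infer_instance

-- ===== CLAIM (what is proved, stated in full; the proofs are below) =====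
def Claim_equal_create_automaton : Prop := ∀ (pattern : String), Dom_create_automaton pattern → Spec_create_automaton pattern (create_automaton pattern)

-- ===== LEMMAS AND PROOFS =====

-- 1-based position of the last occurrence of `a` in cs[0:b], else 0 (proof-side spec).
def pvLastOcc (cs : List Char) : Nat → Char → Int
  | 0, _ => 0
  | b + 1, a => if cs.getD b ' ' = a then ((b : Int) + 1) else pvLastOcc cs b a

-- the loop bodies of the two ports, named so the invariant can mention them
def pvStepA (cs : List Char) (trans : List (Int × Option String × Int)) (i : Int) :
    List (Int × Option String × Int) :=
  ((PySem.Set.ofList cs).foldl (fun trans a =>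
      trans ++ [(i, some (String.singleton a),
        ((PySem.List.pyRange (min (PySem.List.len cs) (i + 1)) 0 (-1)).find?
          (fun j => PySem.List.pyGet? cs (j - 1) == some a)).getD 0)]) trans)
    ++ [(i, none, 0)]

def pvStepB (cs : List Char) (st : PySem.Dict Char Int × List (Int × Option String × Int))
    (i : Int) : PySem.Dict Char Int × List (Int × Option String × Int) :=
  let b : Int := min (PySem.List.len cs) (i + 1)
  let last := if 1 ≤ b then
      (match PySem.List.pyGet? cs (b - 1) with
       | some c => st.1.insert c b
       | none => st.1)
    else st.1
  let trans := ((PySem.Set.ofList cs).foldl (fun trans a =>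
      trans ++ [(i, some (String.singleton a), last.getD a 0)]) st.2)
    ++ [(i, none, 0)]
  (last, trans)

def pvInit (cs : List Char) : PySem.Dict Char Int :=
  (PySem.Set.ofList cs).foldl (fun d a => d.insert a 0) PySem.Dict.empty

-- B's initial dict maps everything to 0 (under default 0).
theorem pv_getD_init (cs : List Char) (a : Char) : (pvInit cs).getD a 0 = 0 := by
  have h : ∀ (l : List Char) (d : PySem.Dict Char Int), d.getD a 0 = 0 →
      (l.foldl (fun d a => d.insert a 0) d).getD a 0 = 0 := by
    intro l
    induction l with
    | nil => intro d h; simpa using h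
    | cons x xs ih =>
        intro d h
        simp only [List.foldl_cons]
        exact ih _ (by rw [PySem.Dict.getD_insert]; split <;> simp [h])
  exact h _ _ (by simp [pysem])

-- A's descending scan computes the last occurrence.
theorem pv_find_eq_lastOcc (cs : List Char) (a : Char) (b : Nat) (hb : b ≤ cs.length) :
    ((PySem.List.pyRange (b : Int) 0 (-1)).find?
        (fun j => PySem.List.pyGet? cs (j - 1) == some a)).getD 0 = pvLastOcc cs b a := by
  induction b with
  | zero => simp [PySem.List.pyRange_neg_one_eq_nil (by omega : (0:Int) ≤ 0), pvLastOcc]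
  | succ b ih =>
      rw [show ((b + 1 : Nat) : Int) = (b : Int) + 1 by omega]
      rw [PySem.List.pyRange_neg_one_cons (by omega)]
      simp only [List.find?_cons]
      obtain ⟨x, hx⟩ : ∃ x, cs[b]? = some x := ⟨_, List.getElem?_eq_getElem (by omega)⟩
      have hgd : cs.getD b ' ' = x := by simp [List.getD_eq_getElem?_getD, hx]
      have hidx : PySem.List.pyGet? cs ((b : Int) + 1 - 1) = some x := by
        rw [show (b : Int) + 1 - 1 = ((b : Nat) : Int) by omega,
          PySem.List.pyGet?_natCast, hx]
      rw [hidx]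
      by_cases hc : x = a
      · have hT : (some x == some a) = true := by simp [hc]
        rw [hT]
        simp only [Option.getD_some, pvLastOcc, hgd, if_pos hc]
      · have hF : (some x == some a) = false := by simp [hc]
        rw [hF]
        rw [show ((b : Int) + 1) - 1 = ((b : Nat) : Int) from by ring, ih (by omega)]
        simp only [pvLastOcc, hgd, if_neg hc]

-- how the last-occurrence position changes when the prefix bound grows by one step
theorem pv_lastOcc_step (cs : List Char) (a : Char) (t : Nat) (hm : 1 ≤ cs.length) :
    pvLastOcc cs (min cs.length (t + 1)) a =
      if cs.getD (min cs.length (t + 1) - 1) ' ' = a then ((min cs.length (t + 1) : Nat) : Int)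
      else pvLastOcc cs (min cs.length t) a := by
  by_cases ht : t + 1 ≤ cs.length
  · have h1 : min cs.length (t + 1) = t + 1 := by omega
    have h2 : min cs.length t = t := by omega
    rw [h1, h2]
    simp [pvLastOcc]
  · have h1 : min cs.length (t + 1) = cs.length := by omega
    have h2 : min cs.length t = cs.length := by omega
    rw [h1, h2]
    obtain ⟨b, hb⟩ : ∃ b, cs.length = b + 1 := ⟨cs.length - 1, by omega⟩
    rw [hb]
    simp only [pvLastOcc, Nat.add_sub_cancel]
    split_ifs with h3 <;> [skip; rfl]
    push_cast
    ring

-- the main loop invariant: after t iterations B's dict agrees with pvLastOcc at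
-- prefix bound min |cs| t, and B's accumulated output is exactly A's
theorem pv_main (cs : List Char) (t : Nat) (ht : t ≤ cs.length + 1) :
    (∀ a, (((List.range t).map (fun k : Nat => (k : Int))).foldl (pvStepB cs) (pvInit cs, [])).1.getD a 0
        = pvLastOcc cs (min cs.length t) a) ∧
      (((List.range t).map (fun k : Nat => (k : Int))).foldl (pvStepB cs) (pvInit cs, [])).2
        = ((List.range t).map (fun k : Nat => (k : Int))).foldl (pvStepA cs) [] := by
  induction t with
  | zero => simp [pv_getD_init, pvLastOcc]
  | succ t ih =>
      obtain ⟨ih1, ih2⟩ := ih (by omega)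
      rw [List.range_succ]
      simp only [List.map_append, List.map_cons, List.map_nil, List.foldl_append,
        List.foldl_cons, List.foldl_nil]
      have hmin : min (PySem.List.len cs) ((t : Int) + 1) = ((min cs.length (t + 1) : Nat) : Int) := by
        simp only [PySem.List.len_eq]; push_cast; omega
      by_cases hm : 1 ≤ cs.length
      · -- the bound b = min m (t+1) is ≥ 1: the dict is updated at cs[b-1]
        have hb1 : (1 : Int) ≤ ((min cs.length (t + 1) : Nat) : Int) := by
          have : 1 ≤ min cs.length (t + 1) := by omega
          exact_mod_cast this
        obtain ⟨x, hx⟩ : ∃ x, cs[min cs.length (t + 1) - 1]? = some x :=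
          ⟨_, List.getElem?_eq_getElem (by omega)⟩
        have hgd : cs.getD (min cs.length (t + 1) - 1) ' ' = x := by
          simp [List.getD_eq_getElem?_getD, hx]
        have hidx : PySem.List.pyGet? cs (((min cs.length (t + 1) : Nat) : Int) - 1)
            = some x := by
          rw [show ((min cs.length (t + 1) : Nat) : Int) - 1
                = ((min cs.length (t + 1) - 1 : Nat) : Int) by
              have : 1 ≤ min cs.length (t + 1) := by omega
              push_cast [this]; ring,
            PySem.List.pyGet?_natCast, hx]
        have hdict : ∀ a,
            ((((List.range t).map (fun k : Nat => (k : Int))).foldl (pvStepB cs) (pvInit cs, [])).1.insert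
                x ((min cs.length (t + 1) : Nat) : Int)).getD a 0
              = pvLastOcc cs (min cs.length (t + 1)) a := by
          intro a
          rw [PySem.Dict.getD_insert, pv_lastOcc_step cs a t hm, hgd]
          rcases eq_or_ne a x with hax | hax
          · simp [hax]
          · rw [if_neg hax, if_neg (Ne.symm hax), ih1]
        constructor
        · intro a
          simp only [pvStepB, hmin, if_pos hb1, hidx]
          exact hdict a
        · simp only [pvStepB, pvStepA, hmin, if_pos hb1, hidx]
          rw [ih2, PySem.List.foldl_append_singleton_eq_map,
            PySem.List.foldl_append_singleton_eq_map]
          congr 2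
          apply List.map_congr_left
          intro a _
          have hfind := pv_find_eq_lastOcc cs a (min cs.length (t + 1)) (by omega)
          rw [hdict a, ← hfind]
      · -- empty pattern: the bound is 0 and the dict is never touched
        have hm0 : cs.length = 0 := by omega
        have hb0 : ¬ (1 : Int) ≤ ((min cs.length (t + 1) : Nat) : Int) := by
          simp [hm0]
        constructor
        · intro a
          simp only [pvStepB, hmin, if_neg hb0]
          rw [ih1]
          simp [hm0]
        · simp only [pvStepB, pvStepA, hmin, if_neg hb0]
          rw [ih2, PySem.List.foldl_append_singleton_eq_map,
            PySem.List.foldl_append_singleton_eq_map]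
          congr 2
          apply List.map_congr_left
          intro a _
          have hfind := pv_find_eq_lastOcc cs a (min cs.length (t + 1)) (by omega)
          rw [ih1 a, hfind]
          simp [hm0]

-- ===== VERDICT (by name: the statement is the Claim_ definition above) =====
theorem create_automaton_spec : Claim_equal_create_automaton := by
  intro pattern _
  unfold Spec_create_automaton create_automaton create_automaton_alt
  have hr : PySem.List.pyRange 0 (PySem.List.len pattern.toList + 1) 1
      = List.map (fun k : Nat => (k : Int)) (List.range (pattern.toList.length + 1)) := by
    rw [show PySem.List.len pattern.toList + 1
          = ((pattern.toList.length + 1 : Nat) : Int) by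
        simp only [PySem.List.len_eq]; push_cast; ring]
    exact PySem.List.pyRange_zero_nat _
  simp only [hr]
  exact (pv_main pattern.toList (pattern.toList.length + 1) (le_refl _)).2.symm
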